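-- pv_equiv track=rewrite | github.com/Bernaljp/graph-analysis | graph_analysis.py | get_candidate_permutations
-- ===== SOURCE A (Python) =====
-- import itertools
-- from collections import defaultdict
--
-- def get_candidate_permutations(invariants, n):
--     """
--     Generate candidate permutations based on node invariants.
--     Groups nodes by identical invariants and permutes within groups.
--     Returns a list of permutations to check.
--     """
--     # Group nodes by invariants
--     invariant_to_nodes = defaultdict(list)
--     for idx, inv in enumerate(invariants):
--         invariant_to_nodes[inv].append(idx)
--
--     # Sort invariants to prioritize "heavier" nodes (lexicographically larger)
--     sorted_invariants = sorted(invariant_to_nodes.keys(), reverse=True)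
--
--     # Generate permutations of nodes within each invariant group
--     group_perms = []
--     for inv in sorted_invariants:
--         nodes = invariant_to_nodes[inv]
--         group_perms.append(list(itertools.permutations(nodes)))
--
--     # Combine permutations across groups
--     candidate_perms = []
--     for group_perm_combo in itertools.product(*group_perms):
--         # Flatten the permutation
--         perm = []
--         for group_perm in group_perm_combo:
--             perm.extend(group_perm)
--         # Ensure full permutation
--         if len(perm) == n:
--             candidate_perms.append(perm)
--
--     # Fallback to all permutations if none generated (e.g., n=1 or identical invariants)
--     if not candidate_perms:
--         candidate_perms = list(itertools.permutations(range(n)))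
--
--     return candidate_perms
-- ===== SOURCE B (Python) =====
-- import itertools
-- from collections import defaultdict
--
-- def get_candidate_permutations(invariants, n):
--     """
--     Same result as A, but instead of materialising per-group permutation lists
--     and combining them with itertools.product, enumerate the combined
--     permutations directly by recursive backtracking over a pending list of
--     groups (choosing the remaining node of the current group in input-position
--     order at each step).
--     """
--     groups = defaultdict(list)
--     for idx, inv in enumerate(invariants):
--         groups[inv].append(idx)
--     pending = [groups[k] for k in sorted(groups, reverse=True)]
--
--     def go(pending):
--         if not pending:
--             return [[]]
--         rem = pending[0]
--         if not rem:
--             return go(pending[1:])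
--         out = []
--         for i in range(len(rem)):
--             x, rest = rem[i], rem[:i] + rem[i + 1:]
--             for tail in go([rest] + pending[1:]):
--                 out.append([x] + tail)
--         return out
--
--     result = go(pending) if len(invariants) == n else []
--     if not result:
--         result = list(itertools.permutations(range(n)))
--     return result
-- ===== Notes on version B (the rewrite author's own statement) =====
-- stated objective: alternative
-- what changed: Replaces A's precomputation of each group's full permutation list plus itertools.product combination with a single recursive backtracking enumeration over the pending sorted groups (choosing the next remaining node of the current group in input-position order), and hoists the per-permutation len==n guard to one upfront length check.
import Mathlib
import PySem

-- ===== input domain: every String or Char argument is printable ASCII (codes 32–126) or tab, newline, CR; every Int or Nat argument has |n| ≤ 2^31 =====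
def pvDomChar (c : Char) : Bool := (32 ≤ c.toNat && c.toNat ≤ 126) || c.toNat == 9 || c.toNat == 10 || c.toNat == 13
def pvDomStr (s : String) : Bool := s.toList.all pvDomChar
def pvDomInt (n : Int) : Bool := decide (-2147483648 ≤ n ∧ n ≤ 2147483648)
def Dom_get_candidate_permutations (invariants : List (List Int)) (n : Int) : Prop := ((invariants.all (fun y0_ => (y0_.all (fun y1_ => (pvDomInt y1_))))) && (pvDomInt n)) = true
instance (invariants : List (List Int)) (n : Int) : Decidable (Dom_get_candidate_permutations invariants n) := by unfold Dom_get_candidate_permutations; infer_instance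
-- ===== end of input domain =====

-- B replaces A's per-group permutation lists + itertools.product combination by one recursive
-- backtracking enumeration over the pending sorted groups (objective: alternative, same cost).

-- ===== PORT A =====
-- selections of one element (in position order) paired with the remaining elements;
-- shared by both ports (Source B's inner loop builds exactly rem[i], rem[:i]+rem[i+1:])
def pvSelections : List Int → List (Int × List Int)
  | [] => []
  | x :: xs => (x, xs) :: (pvSelections xs).map (fun p => (p.1, x :: p.2))

-- termination lemma for the recursions below
theorem pvSelections_length {xs : List Int} {p : Int × List Int} (hp : p ∈ pvSelections xs) :
    p.2.length + 1 = xs.length := by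
  induction xs generalizing p with
  | nil => simp [pvSelections] at hp
  | cons x xs ih =>
    simp only [pvSelections, List.mem_cons, List.mem_map] at hp
    rcases hp with rfl | ⟨q, hq, rfl⟩
    · simp
    · have := ih hq; simp at this ⊢; omega

-- list(itertools.permutations(xs)) in itertools' order
def pyPermutations (xs : List Int) : List (List Int) :=
  match xs with
  | [] => [[]]
  | x :: t =>
    (pvSelections (x :: t)).attach.flatMap (fun q => (pyPermutations q.1.2).map (q.1.1 :: ·))
termination_by xs.length
decreasing_by
  have := pvSelections_length q.2
  simp at this ⊢; omega

-- itertools.product(*lists), first list outermost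
def pyProduct : List (List (List Int)) → List (List (List Int))
  | [] => [[]]
  | g :: gs => g.flatMap (fun x => (pyProduct gs).map (fun c => x :: c))

-- the defaultdict(list) grouping loop (identical in A and in Source B)
def pvGroupDict (invariants : List (List Int)) : PySem.Dict (List Int) (List Int) :=
  (PySem.List.enumerate invariants 0).foldl
    (fun d p => d.modify p.2 [] (fun v => v ++ [p.1])) PySem.Dict.empty

def get_candidate_permutations (invariants : List (List Int)) (n : Int) : List (List Int) :=
  let d := pvGroupDict invariants
  let sortedInvariants := PySem.List.sorted d.keys (fun k => k) true
  let groupPerms := sortedInvariants.foldl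
    (fun acc inv => acc ++ [pyPermutations (d.getD inv [])]) []
  let candidatePerms := (pyProduct groupPerms).foldl
    (fun acc combo =>
      let perm := combo.foldl (fun a g => a ++ g) []
      if (perm.length : Int) == n then acc ++ [perm] else acc) []
  if candidatePerms = [] then pyPermutations (PySem.List.pyRange 0 n 1) else candidatePerms

-- ===== PORT B =====
-- Source B's go(pending): backtracking over the pending list of groups
def pvGo : List (List Int) → List (List Int)
  | [] => [[]]
  | rem :: gs =>
    if rem = [] then pvGo gs
    else (pvSelections rem).attach.flatMap (fun q => (pvGo (q.1.2 :: gs)).map (q.1.1 :: ·))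
termination_by l => 2 * l.flatten.length + l.length
decreasing_by
  · simp; omega
  · have := pvSelections_length q.2
    simp at this ⊢; omega

def get_candidate_permutations_alt (invariants : List (List Int)) (n : Int) : List (List Int) :=
  let d := pvGroupDict invariants
  let pending := (PySem.List.sorted d.keys (fun k => k) true).map (fun k => d.getD k [])
  let result := if (invariants.length : Int) = n then pvGo pending else []
  if result = [] then pyPermutations (PySem.List.pyRange 0 n 1) else result

-- ===== PRECONDITION & SPEC =====
def Spec_get_candidate_permutations (invariants : List (List Int)) (n : Int) (out : List (List Int)) : Prop := out = get_candidate_permutations_alt invariants n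
instance (invariants : List (List Int)) (n : Int) (out : List (List Int)) : Decidable (Spec_get_candidate_permutations invariants n out) := by unfold Spec_get_candidate_permutations; infer_instance

-- ===== CLAIM (what is proved, stated in full; the proofs are below) =====
def Claim_equal_get_candidate_permutations : Prop := ∀ (invariants : List (List Int)) (n : Int), Dom_get_candidate_permutations invariants n → Spec_get_candidate_permutations invariants n (get_candidate_permutations invariants n)

-- ===== LEMMAS AND PROOFS =====

theorem pvFoldlAppendMap {α β : Type} (l : List α) (f : α → β) (init : List β) :
    l.foldl (fun acc x => acc ++ [f x]) init = init ++ l.map f := by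
  induction l generalizing init with
  | nil => simp
  | cons x xs ih => simp [ih]

theorem pvFoldlFlatten (c : List (List Int)) (a : List Int) :
    c.foldl (fun a g => a ++ g) a = a ++ c.flatten := by
  induction c generalizing a with
  | nil => simp
  | cons g gs ih => simp [ih]

theorem pvFoldlFilterMap {α β : Type} (l : List α) (p : α → Bool) (f : α → List β) (init : List (List β)) :
    l.foldl (fun acc x => if p x then acc ++ [f x] else acc) init = init ++ (l.filter p).map f := by
  induction l generalizing init with
  | nil => simp
  | cons x xs ih => by_cases h : p x <;> simp [h, ih]

theorem pvFlatMapCongr {α β : Type} {l : List α} {f g : α → List β} (h : ∀ x ∈ l, f x = g x) :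
    l.flatMap f = l.flatMap g := by
  induction l with
  | nil => rfl
  | cons x xs ih =>
    simp only [List.flatMap_cons]
    rw [h x (by simp), ih (fun y hy => h y (by simp [hy]))]

theorem pvAttachFlatMap {α β : Type} (l : List α) (F : α → List β) :
    l.attach.flatMap (fun q => F q.1) = l.flatMap F := by
  conv_rhs => rw [← List.attach_map_subtype_val l]
  rw [List.flatMap_map]

theorem pyPermutations_eq (xs : List Int) (h : xs ≠ []) :
    pyPermutations xs = (pvSelections xs).flatMap (fun p => (pyPermutations p.2).map (p.1 :: ·)) := by
  match xs with
  | [] => exact absurd rfl h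
  | x :: t =>
    rw [pyPermutations]
    exact pvAttachFlatMap (pvSelections (x :: t)) (fun p => (pyPermutations p.2).map (p.1 :: ·))

theorem pyPermutations_mem_length (xs : List Int) : ∀ p ∈ pyPermutations xs, p.length = xs.length := by
  match xs with
  | [] => intro p hp; simp [pyPermutations] at hp; simp [hp]
  | x :: t =>
    intro p hp
    rw [pyPermutations_eq _ (by simp)] at hp
    simp only [List.mem_flatMap, List.mem_map] at hp
    obtain ⟨q, hq, r, hr, rfl⟩ := hp
    have hlen := pvSelections_length hq
    have hr' := pyPermutations_mem_length q.2 r hr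
    simp at hlen ⊢; omega
termination_by xs.length
decreasing_by
  have := pvSelections_length hq
  simp at this ⊢; omega

theorem pvGo_cons (rem : List Int) (gs : List (List Int)) :
    pvGo (rem :: gs) = (pyPermutations rem).flatMap (fun p => (pvGo gs).map (p ++ ·)) := by
  match rem with
  | [] =>
    rw [pvGo]; simp [pyPermutations]
  | x :: t =>
    rw [pvGo]
    simp only [if_neg (by simp : ¬(x :: t = []))]
    rw [pvAttachFlatMap (pvSelections (x :: t)) (fun p => (pvGo (p.2 :: gs)).map (p.1 :: ·))]
    rw [pyPermutations_eq _ (by simp), List.flatMap_assoc]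
    apply pvFlatMapCongr
    intro q hq
    have hrec := pvGo_cons q.2 gs
    rw [hrec]
    simp [List.map_flatMap, List.flatMap_map, List.map_map, Function.comp_def]
termination_by rem.length
decreasing_by
  have := pvSelections_length hq
  simp at this ⊢; omega

theorem pvGo_eq (gs : List (List Int)) :
    pvGo gs = (pyProduct (gs.map pyPermutations)).map (fun c => c.flatten) := by
  induction gs with
  | nil => rw [pvGo]; simp [pyProduct]
  | cons g t ih =>
    rw [pvGo_cons, ih]
    simp [pyProduct, List.map_flatMap, List.map_map, Function.comp_def, List.flatten_cons]

theorem pyProduct_mem_flatten_length (gs : List (List Int)) :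
    ∀ c ∈ pyProduct (gs.map pyPermutations), c.flatten.length = (gs.map List.length).sum := by
  induction gs with
  | nil => intro c hc; simp [pyProduct] at hc; simp [hc]
  | cons g t ih =>
    intro c hc
    simp only [List.map_cons, pyProduct, List.mem_flatMap, List.mem_map] at hc
    obtain ⟨x, hx, d, hd, rfl⟩ := hc
    have h1 := pyPermutations_mem_length g x hx
    have h2 := ih d hd
    simp [h1, h2]

theorem pvGroupDict_getD (invariants : List (List Int)) (k : List Int) :
    (pvGroupDict invariants).getD k [] =
      ((PySem.List.enumerate invariants 0).filter (fun p => p.2 == k)).map (·.1) := by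
  unfold pvGroupDict
  have h1 : (PySem.List.enumerate invariants 0).foldl
      (fun d p => d.modify p.2 [] (fun v => v ++ [p.1])) PySem.Dict.empty
      = ((PySem.List.enumerate invariants 0).map Prod.swap).foldl
      (fun d p => d.modify p.1 [] (fun v => v ++ [p.2])) PySem.Dict.empty := by
    rw [List.foldl_map]
    rfl
  rw [h1, PySem.Dict.getD_foldl_modify_append]
  simp [PySem.Dict.getD_empty, List.filter_map, List.map_map, Function.comp_def, Prod.fst_swap, Prod.snd_swap]

theorem pvGroupDict_keys (invariants : List (List Int)) :
    (pvGroupDict invariants).keys = PySem.Set.ofList invariants := by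
  unfold pvGroupDict
  rw [PySem.Dict.keys_foldl_modify_key (PySem.List.enumerate invariants 0)
      (fun p => p.2) [] (fun _ p => fun v => v ++ [p.1]) PySem.Dict.empty]
  rw [PySem.List.map_snd_enumerate, PySem.Dict.keys_empty]
  rw [PySem.Set.ofList_eq_foldl]
  rfl

theorem pvFilterSplit {α : Type} (l : List α) (p : α → Bool) :
    (l.filter p).length + (l.filter (fun x => !p x)).length = l.length := by
  induction l with
  | nil => simp
  | cons x xs ih => by_cases h : p x <;> simp [h] <;> omega

theorem pvSumFilter (ks : List (List Int)) :
    ∀ (l : List (Int × List Int)), ks.Nodup → (∀ p ∈ l, p.2 ∈ ks) →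
    (ks.map (fun k => (l.filter (fun p => p.2 == k)).length)).sum = l.length := by
  induction ks with
  | nil =>
    intro l _ hmem
    have : l = [] := List.eq_nil_iff_forall_not_mem.2 (fun p hp => by simpa using hmem p hp)
    simp [this]
  | cons k ks ih =>
    intro l hnd hmem
    have hk : k ∉ ks := (List.nodup_cons.1 hnd).1
    simp only [List.map_cons, List.sum_cons]
    have hter : ks.map (fun k' => (l.filter (fun p => p.2 == k')).length)
        = ks.map (fun k' => ((l.filter (fun p => !(p.2 == k))).filter (fun p => p.2 == k')).length) := by
      apply List.map_congr_left
      intro k' hk'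
      have hne : k' ≠ k := fun h => hk (h ▸ hk')
      rw [List.filter_filter]
      congr 1
      apply List.filter_congr
      intro p _
      by_cases h : p.2 = k'
      · simp [h, hne]
      · simp [h]
    rw [hter, ih (l.filter (fun p => !(p.2 == k))) (List.nodup_cons.1 hnd).2]
    · have := pvFilterSplit l (fun p => p.2 == k)
      omega
    · intro p hp
      simp only [List.mem_filter, Bool.not_eq_true', beq_eq_false_iff_ne] at hp
      have := hmem p hp.1
      simp only [List.mem_cons] at this
      exact this.resolve_left hp.2

theorem pvPendingSum (invariants : List (List Int)) :
    (((PySem.List.sorted (pvGroupDict invariants).keys (fun k => k) true).map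
        (fun k => (pvGroupDict invariants).getD k [])).map List.length).sum
      = invariants.length := by
  rw [List.map_map]
  have h1 : ((PySem.List.sorted (pvGroupDict invariants).keys (fun k => k) true).map
      (List.length ∘ fun k => (pvGroupDict invariants).getD k []))
      = (PySem.List.sorted (pvGroupDict invariants).keys (fun k => k) true).map
        (fun k => ((PySem.List.enumerate invariants 0).filter (fun p => p.2 == k)).length) := by
    apply List.map_congr_left
    intro k _
    simp [Function.comp, pvGroupDict_getD]
  rw [h1]
  have hperm : (PySem.List.sorted (pvGroupDict invariants).keys (fun k => k) true).Perm
      (PySem.Set.ofList invariants) := by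
    rw [← pvGroupDict_keys]
    exact PySem.List.sorted_perm _ _ _
  have hnd : (PySem.List.sorted (pvGroupDict invariants).keys (fun k => k) true).Nodup :=
    hperm.nodup_iff.2 (PySem.Set.nodup_ofList invariants)
  rw [pvSumFilter _ (PySem.List.enumerate invariants 0) hnd]
  · exact PySem.List.length_enumerate invariants 0
  · intro p hp
    rw [PySem.List.mem_sorted, pvGroupDict_keys, PySem.Set.mem_ofList]
    have : p.2 ∈ (PySem.List.enumerate invariants 0).map (fun x => x.2) := List.mem_map_of_mem hp
    rwa [PySem.List.map_snd_enumerate] at this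

theorem pvMainEq (invariants : List (List Int)) (n : Int) :
    get_candidate_permutations invariants n = get_candidate_permutations_alt invariants n := by
  have hGP : (PySem.List.sorted (pvGroupDict invariants).keys (fun k => k) true).foldl
      (fun acc inv => acc ++ [pyPermutations ((pvGroupDict invariants).getD inv [])]) []
      = ((PySem.List.sorted (pvGroupDict invariants).keys (fun k => k) true).map
          (fun k => (pvGroupDict invariants).getD k [])).map pyPermutations := by
    rw [pvFoldlAppendMap]
    simp [List.map_map, Function.comp]
  have hcand : (pyProduct ((PySem.List.sorted (pvGroupDict invariants).keys (fun k => k) true).foldl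
        (fun acc inv => acc ++ [pyPermutations ((pvGroupDict invariants).getD inv [])]) [])).foldl
        (fun acc combo =>
          if ((combo.foldl (fun a g => a ++ g) []).length : Int) == n
          then acc ++ [combo.foldl (fun a g => a ++ g) []] else acc) []
      = (if (invariants.length : Int) = n
         then pvGo ((PySem.List.sorted (pvGroupDict invariants).keys (fun k => k) true).map
             (fun k => (pvGroupDict invariants).getD k []))
         else []) := by
    rw [hGP, pvFoldlFilterMap]
    by_cases hn : (invariants.length : Int) = n
    · rw [if_pos hn]
      have hfil : ((pyProduct (((PySem.List.sorted (pvGroupDict invariants).keys (fun k => k) true).map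
          (fun k => (pvGroupDict invariants).getD k [])).map pyPermutations)).filter
          (fun combo => ((combo.foldl (fun a g => a ++ g) []).length : Int) == n))
          = pyProduct (((PySem.List.sorted (pvGroupDict invariants).keys (fun k => k) true).map
          (fun k => (pvGroupDict invariants).getD k [])).map pyPermutations) := by
        apply List.filter_eq_self.2
        intro c hc
        rw [pvFoldlFlatten, List.nil_append]
        have := pyProduct_mem_flatten_length _ c hc
        rw [this, pvPendingSum invariants]
        simpa using hn
      rw [hfil, pvGo_eq]
      simp only [List.nil_append]
      apply List.map_congr_left
      intro c _
      rw [pvFoldlFlatten, List.nil_append]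
    · rw [if_neg hn]
      have hfil : ((pyProduct (((PySem.List.sorted (pvGroupDict invariants).keys (fun k => k) true).map
          (fun k => (pvGroupDict invariants).getD k [])).map pyPermutations)).filter
          (fun combo => ((combo.foldl (fun a g => a ++ g) []).length : Int) == n)) = [] := by
        apply List.filter_eq_nil_iff.2
        intro c hc
        rw [pvFoldlFlatten, List.nil_append]
        have := pyProduct_mem_flatten_length _ c hc
        rw [this, pvPendingSum invariants]
        simpa using hn
      rw [hfil]
      simp
  show (if _ = ([] : List (List Int)) then _ else _) = _
  rw [hcand]
  rfl

-- ===== VERDICT (by name: the statement is the Claim_ definition above) =====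
theorem get_candidate_permutations_spec : Claim_equal_get_candidate_permutations := by
  intro invariants n _
  unfold Spec_get_candidate_permutations
  exact pvMainEq invariants n
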